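-- pv_equiv track=rewrite | github.com/HarshPrabhakar/Mag-Null | app/core/pipeline.py | _global_threat
-- ===== SOURCE A (Python) =====
-- def _global_threat(contacts):
--     if any(c["rf_silent"] for c in contacts):
--         return "TERMINAL", 5
--     if any(c["tl"] >= 3 for c in contacts):
--         return "CRITICAL", 4
--     if any(c["tl"] >= 2 for c in contacts):
--         return "WARNING", 3
--     if contacts:
--         return "ACTIVE", 2
--     return "CLEAR", 1
-- ===== SOURCE B (Python) =====
-- def _global_threat(contacts):
--     # Same RF-silent scan first; then ONE pass over threat levels with an early
--     # CRITICAL exit and a running max, classified once after the loop (replaces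
--     # A's two extra any() scans).
--     if any(c["rf_silent"] for c in contacts):
--         return "TERMINAL", 5
--     best = 0
--     for c in contacts:
--         tl = c["tl"]
--         if tl >= 3:
--             return "CRITICAL", 4
--         if tl > best:
--             best = tl
--     if best >= 2:
--         return "WARNING", 3
--     if contacts:
--         return "ACTIVE", 2
--     return "CLEAR", 1
-- ===== Notes on version B (the rewrite author's own statement) =====
-- stated objective: simpler
-- what changed: Keeps the RF-silent scan but replaces A's two separate threshold any() scans plus the emptiness test by one loop with an early CRITICAL exit and a running max threat level, classified once after the loop.
import Mathlib
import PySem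

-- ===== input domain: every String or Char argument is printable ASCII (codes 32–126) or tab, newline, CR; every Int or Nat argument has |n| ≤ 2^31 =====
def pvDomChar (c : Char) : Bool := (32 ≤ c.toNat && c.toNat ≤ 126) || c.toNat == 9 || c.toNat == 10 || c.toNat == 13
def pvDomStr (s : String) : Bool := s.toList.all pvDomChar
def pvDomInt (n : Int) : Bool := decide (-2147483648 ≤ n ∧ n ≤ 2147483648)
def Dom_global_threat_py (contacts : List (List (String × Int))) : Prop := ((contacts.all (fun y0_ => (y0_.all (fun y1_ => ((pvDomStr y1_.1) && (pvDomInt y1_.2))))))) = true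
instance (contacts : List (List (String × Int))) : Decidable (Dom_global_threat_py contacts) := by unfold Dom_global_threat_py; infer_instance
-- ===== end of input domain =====

-- B keeps A's RF-silent scan but replaces the two threshold any() scans and the
-- emptiness test by one loop (early CRITICAL exit, running max) with a single
-- post-loop classification; it agrees with A (value or exception) on every input.

-- dict lookup c[k] (first match; none = KeyError)
def pvLookup (c : List (String × Int)) (k : String) : Option Int :=
  (c.find? (fun p => p.1 == k)).map Prod.snd

-- ===== PORT A =====
def global_threat_py (contacts : List (List (String × Int))) : String × Int :=
  if contacts.any (fun c => (pvLookup c "rf_silent").getD 0 != 0) then ("TERMINAL", 5)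
  else if contacts.any (fun c => (pvLookup c "tl").getD 0 ≥ 3) then ("CRITICAL", 4)
  else if contacts.any (fun c => (pvLookup c "tl").getD 0 ≥ 2) then ("WARNING", 3)
  else if !contacts.isEmpty then ("ACTIVE", 2)
  else ("CLEAR", 1)

-- ===== PORT B =====
-- the for-loop: early CRITICAL exit (Sum.inl) or the final running max (Sum.inr best)
def gtLoop (l : List (List (String × Int))) (best : Int) : (String × Int) ⊕ Int :=
  match l with
  | [] => Sum.inr best
  | c :: rest =>
    let tl := (pvLookup c "tl").getD 0
    if tl ≥ 3 then Sum.inl ("CRITICAL", 4)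
    else gtLoop rest (if tl > best then tl else best)

def global_threat_py_alt (contacts : List (List (String × Int))) : String × Int :=
  if contacts.any (fun c => (pvLookup c "rf_silent").getD 0 != 0) then ("TERMINAL", 5)
  else
    match gtLoop contacts 0 with
    | Sum.inl r => r
    | Sum.inr best =>
      if best ≥ 2 then ("WARNING", 3)
      else if !contacts.isEmpty then ("ACTIVE", 2)
      else ("CLEAR", 1)

-- ===== PRECONDITION & SPEC =====
-- Pre_ excludes exactly the inputs on which the Python A raises KeyError (B raises
-- there too): a contact lacking "rf_silent" before the first RF-silent contact, or —
-- when no contact is RF-silent — a contact lacking "tl" before the first tl >= 3.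
def Pre_global_threat_py (contacts : List (List (String × Int))) : Prop :=
  (∀ c ∈ (contacts.dropWhile (fun c => pvLookup c "rf_silent" == some 0)).take 1,
      (pvLookup c "rf_silent").isSome = true) ∧
  ((contacts.dropWhile (fun c => pvLookup c "rf_silent" == some 0)) = [] →
    ∀ c ∈ (contacts.dropWhile (fun c => (pvLookup c "tl").getD 3 < 3)).take 1,
      (pvLookup c "tl").isSome = true)
instance (contacts : List (List (String × Int))) : Decidable (Pre_global_threat_py contacts) := by unfold Pre_global_threat_py; infer_instance
def pvWitness_global_threat_py : (List (List (String × Int))) := [[("rf_silent", 0), ("tl", 2)]]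

def Spec_global_threat_py (contacts : List (List (String × Int))) (out : String × Int) : Prop := out = global_threat_py_alt contacts
instance (contacts : List (List (String × Int))) (out : String × Int) : Decidable (Spec_global_threat_py contacts out) := by unfold Spec_global_threat_py; infer_instance

-- ===== CLAIM (what is proved, stated in full; the proofs are below) =====
def Claim_equal_global_threat_py : Prop := ∀ (contacts : List (List (String × Int))), Dom_global_threat_py contacts → Pre_global_threat_py contacts → Spec_global_threat_py contacts (global_threat_py contacts)

-- ===== LEMMAS AND PROOFS =====

-- the loop returns early iff some tl >= 3, otherwise it is the running max fold
theorem gtLoop_eq (l : List (List (String × Int))) (b : Int) :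
    gtLoop l b =
      if l.any (fun c => (pvLookup c "tl").getD 0 ≥ 3) then Sum.inl ("CRITICAL", 4)
      else Sum.inr (l.foldl (fun a c =>
        if (pvLookup c "tl").getD 0 > a then (pvLookup c "tl").getD 0 else a) b) := by
  induction l generalizing b with
  | nil => simp [gtLoop]
  | cons c l ih =>
      simp only [gtLoop, List.any_cons, List.foldl_cons, Bool.or_eq_true]
      by_cases h : ((pvLookup c "tl").getD 0 ≥ 3)
      · simp [h]
      · simp [h, ih]

theorem gt_fold_ge (l : List (List (String × Int))) (b k : Int) :
    (k ≤ l.foldl (fun a c =>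
        if (pvLookup c "tl").getD 0 > a then (pvLookup c "tl").getD 0 else a) b) ↔
      (k ≤ b ∨ l.any (fun c => (pvLookup c "tl").getD 0 ≥ k) = true) := by
  induction l generalizing b with
  | nil => simp
  | cons c l ih =>
      have hm : (if (pvLookup c "tl").getD 0 > b then (pvLookup c "tl").getD 0 else b)
          = max b ((pvLookup c "tl").getD 0) := by
        rcases le_or_gt ((pvLookup c "tl").getD 0) b with h | h
        · simp [not_lt.mpr h, max_eq_left h]
        · simp [h, max_eq_right (le_of_lt h)]
      simp only [List.foldl_cons, List.any_cons, hm, ih, le_max_iff, Bool.or_eq_true,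
        decide_eq_true_eq]
      tauto

theorem global_threat_py_eq (contacts : List (List (String × Int))) :
    global_threat_py contacts = global_threat_py_alt contacts := by
  unfold global_threat_py global_threat_py_alt
  by_cases hs : (contacts.any (fun c => (pvLookup c "rf_silent").getD 0 != 0)) = true
  · simp [hs]
  · simp only [hs, if_false, Bool.false_eq_true, gtLoop_eq]
    by_cases h3 : (contacts.any (fun c => (pvLookup c "tl").getD 0 ≥ 3)) = true
    · simp [h3]
    · simp only [h3, if_false, Bool.false_eq_true]
      have h2 : (2 ≤ contacts.foldl (fun a c =>
          if (pvLookup c "tl").getD 0 > a then (pvLookup c "tl").getD 0 else a) 0) ↔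
          (contacts.any (fun c => (pvLookup c "tl").getD 0 ≥ 2) = true) := by
        rw [gt_fold_ge]
        constructor
        · rintro (h | h)
          · omega
          · exact h
        · exact Or.inr
      by_cases h2' : (contacts.any (fun c => (pvLookup c "tl").getD 0 ≥ 2)) = true
      · simp [h2', h2.mpr h2']
      · have : ¬ (2 ≤ contacts.foldl (fun a c =>
            if (pvLookup c "tl").getD 0 > a then (pvLookup c "tl").getD 0 else a) 0) := by
          intro h; exact h2' (h2.mp h)
        simp [h2', this]

-- ===== VERDICT (by name: the statement is the Claim_ definition above) =====
theorem global_threat_py_spec : Claim_equal_global_threat_py := by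
  intro contacts _ _
  unfold Spec_global_threat_py
  exact global_threat_py_eq contacts
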